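-- pv_equiv track=rewrite | github.com/Dima-aka-dima/Fuzzy-Sphere | Heisenberg XXZ/main.py | get_representative
-- ===== SOURCE A (Python) =====
-- N = 18
--
-- def get_representative(state):
-- 	mask = (1 << N) - 1
-- 	window = (state << N) | state
--
-- 	r = state
-- 	for t in range(1, N):
-- 		window = window >> 1
-- 		s = window & mask
-- 		r = min(r, s)
--
-- 	return r
-- ===== SOURCE B (Python) =====
-- N = 18
--
-- def get_representative(state):
--     # Radix (column-wise) elimination: instead of scanning all shifted
--     # windows and taking a running min, refine the set of candidate shifts
--     # bit column by bit column from the most significant bit down, then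
--     # evaluate the single surviving window.
--     mask = (1 << N) - 1
--     w = (state << N) | state
--     cands = list(range(1, N))
--     for j in range(N - 1, -1, -1):
--         zeros = [t for t in cands if (w >> (t + j)) & 1 == 0]
--         if zeros:
--             cands = zeros
--     t0 = cands[0]
--     return min(state, (w >> t0) & mask)
-- ===== Notes on version B (the rewrite author's own statement) =====
-- stated objective: alternative
-- what changed: A keeps a running min while shifting the window across all N-1 cyclic shift positions; B instead finds the minimizing shift by radix elimination - it refines the set of candidate shifts one bit-column at a time from the most significant bit down (keeping the shifts whose window bit is 0 whenever any candidate has a 0 there) and evaluates only the single surviving window.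
import Mathlib
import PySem

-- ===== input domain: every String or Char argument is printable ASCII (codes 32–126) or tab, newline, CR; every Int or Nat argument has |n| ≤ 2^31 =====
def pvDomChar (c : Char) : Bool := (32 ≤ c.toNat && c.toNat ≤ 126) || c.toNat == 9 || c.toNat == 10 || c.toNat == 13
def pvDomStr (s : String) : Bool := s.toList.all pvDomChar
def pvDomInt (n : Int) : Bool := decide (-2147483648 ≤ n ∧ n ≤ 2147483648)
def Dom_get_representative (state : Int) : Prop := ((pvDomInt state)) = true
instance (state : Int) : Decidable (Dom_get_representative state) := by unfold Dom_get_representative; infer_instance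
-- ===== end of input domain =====

-- B replaces A's running-min scan over all shifted windows by a radix
-- (bit-column) elimination of candidate shifts, evaluating only the one
-- surviving window (objective: alternative algorithm, same result).

-- ===== PORT A =====
-- literal port of A: window = (state << 18) | state, then N-1 iterations of
-- window >>= 1; r = min(r, window & mask)
def get_representative (state : Int) : Int :=
  let mask : Int := (1 <<< 18) - 1
  let window : Int := PySem.Int.bor (state <<< 18) state
  let p := (PySem.List.pyRange 1 18 1).foldl
    (fun (p : Int × Int) _t =>
      let window := p.1 >>> 1
      let s := PySem.Int.band window mask
      (window, min p.2 s)) (window, state)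
  p.2

-- ===== PORT B =====
-- literal port of Source B: refine candidate shifts column by column, MSB first,
-- keeping those whose window bit is 0 whenever any candidate has a 0 there.
-- Shift amounts t + j are always ≥ 0, so `.toNat` is exact for Python's `>>`.
def get_representative_alt (state : Int) : Int :=
  let mask : Int := (1 <<< 18) - 1
  let w : Int := PySem.Int.bor (state <<< 18) state
  let cands0 : List Int := PySem.List.pyRange 1 18 1
  let cands := (PySem.List.pyRange 17 (-1) (-1)).foldl
    (fun cands j =>
      let zeros := cands.filter (fun t => PySem.Int.band (w >>> (t + j).toNat) 1 == 0)
      if zeros.isEmpty then cands else zeros) cands0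
  let t0 := cands.headD 0   -- cands is provably nonempty; Python's cands[0]
  min state (PySem.Int.band (w >>> t0.toNat) mask)

-- ===== PRECONDITION & SPEC =====
def Spec_get_representative (state : Int) (out : Int) : Prop := out = get_representative_alt state
instance (state : Int) (out : Int) : Decidable (Spec_get_representative state out) := by unfold Spec_get_representative; infer_instance

-- ===== CLAIM (what is proved, stated in full; the proofs are below) =====
def Claim_equal_get_representative : Prop := ∀ (state : Int), Dom_get_representative state → Spec_get_representative state (get_representative state)

-- ===== LEMMAS AND PROOFS =====

-- x & (2^k - 1) is x mod 2^k, also for negative x (Python two's complement)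
lemma band_two_pow_sub_one (x : Int) (k : Nat) :
    PySem.Int.band x ((2 : Int) ^ k - 1) = x % 2 ^ k := by
  have h1 : (1 : Nat) ≤ 2 ^ k := Nat.one_le_two_pow
  have h1' : (1 : Int) ≤ 2 ^ k := by exact_mod_cast h1
  have hm : ((2 : Int) ^ k - 1) = ((2 ^ k - 1 : Nat) : Int) := by push_cast [h1]; ring
  by_cases hx : 0 ≤ x
  · have hx' : x = ((x.toNat : Nat) : Int) := (Int.toNat_of_nonneg hx).symm
    rw [hm, hx', PySem.Int.band_natCast, Nat.and_two_pow_sub_one_eq_mod]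
    push_cast
    rfl
  · have hb : (0 : Int) ≤ (2 : Int) ^ k - 1 := by omega
    simp only [PySem.Int.band, hx, if_false, hb, if_true]
    have hmask : ((2 : Int) ^ k - 1).toNat = 2 ^ k - 1 := by rw [hm, Int.toNat_natCast]
    set n : Nat := (-x - 1).toNat with hnd
    have hn : (n : Int) = -x - 1 := Int.toNat_of_nonneg (by omega)
    rw [hmask, Nat.and_comm, Nat.and_two_pow_sub_one_eq_mod]
    have hle : n % 2 ^ k ≤ 2 ^ k - 1 := by
      have := Nat.mod_lt n (y := 2 ^ k) (by positivity)
      omega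
    have hcast : (((2 ^ k - 1) - n % 2 ^ k : Nat) : Int) = (2 : Int) ^ k - 1 - ((n : Int) % 2 ^ k) := by
      push_cast [hle, h1]
      ring
    rw [hcast]
    set N : Int := (n : Int) with hN
    set K : Int := (2 : Int) ^ k with hK
    have hKpos : (0 : Int) < K := by positivity
    have h0 : 0 ≤ N % K := Int.emod_nonneg _ (ne_of_gt hKpos)
    have hlt : N % K < K := Int.emod_lt_of_pos _ hKpos
    have hd : N - N % K = K * (N / K) := by rw [Int.emod_def]; ring
    have hxn : x = -N - 1 := by omega
    have key : (-N - 1) % K = (K - 1 - N % K) % K := by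
      rw [Int.emod_eq_emod_iff_emod_sub_eq_zero]
      have h2 : (-N - 1) - (K - 1 - N % K) = K * (-(N / K) - 1) := by linear_combination -hd
      rw [h2]
      exact Int.mul_emod_right _ _
    rw [hxn, key]
    exact (Int.emod_eq_of_lt (by omega) (by omega)).symm

lemma band_one_emod (x : Int) : PySem.Int.band x 1 = x % 2 := by
  rw [PySem.Int.band_one, PySem.Int.mod_eq_emod_of_pos (by norm_num)]

lemma shr_eq_div (x : Int) (n : Nat) : x >>> n = x / 2 ^ n := by
  rw [Int.shiftRight_eq_div_pow]; push_cast; ring_nf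

lemma shr_shr (x : Int) (a b : Nat) : (x >>> a) >>> b = x >>> (a + b) := by
  rw [shr_eq_div, shr_eq_div, shr_eq_div, Int.ediv_ediv_of_nonneg (by positivity), ← pow_add]

-- Python's `x >> 1` elaborates with an Int shift amount; connect it to the Nat shift
lemma shr_one (x : Int) : x >>> (1 : Int) = x >>> (1 : Nat) := by
  rw [show (1 : Int) = ((1 : Nat) : Int) from rfl, Int.shiftRight_natCast_right]

-- the j-th-and-up bits of the 18-bit window at shift t
def hiw (w : Int) (t : Int) (j : Nat) : Int := w / 2 ^ t.toNat % 2 ^ 18 / 2 ^ j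

-- bit n of w
def bitw (w : Int) (n : Nat) : Int := w / 2 ^ n % 2

lemma hiw_18 (w t : Int) : hiw w t 18 = 0 := by
  unfold hiw
  exact Int.ediv_eq_zero_of_lt (Int.emod_nonneg _ (by positivity)) (Int.emod_lt_of_pos _ (by positivity))

lemma hiw_zero (w t : Int) : hiw w t 0 = w / 2 ^ t.toNat % 2 ^ 18 := by
  simp [hiw]

lemma hiw_step (w : Int) (t : Int) (j : Nat) (hj : j < 18) :
    hiw w t j = 2 * hiw w t (j + 1) + bitw w (t.toNat + j) := by
  set a : Int := w / 2 ^ t.toNat with ha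
  have e1 : hiw w t (j + 1) = (a % 2 ^ 18 / 2 ^ j) / 2 := by
    unfold hiw
    rw [← ha, Int.ediv_ediv_of_nonneg (by positivity), ← pow_succ]
  have e2 : bitw w (t.toNat + j) = (a / 2 ^ j) % 2 := by
    unfold bitw
    rw [ha, Int.ediv_ediv_of_nonneg (by positivity), ← pow_add]
  have hp : (2 : Int) ^ (18 - j) * 2 ^ j = 2 ^ 18 := by
    rw [← pow_add, Nat.sub_add_cancel hj.le]
  set q : Int := a / 2 ^ 18 with hq
  have hd : a % 2 ^ 18 = a - 2 ^ 18 * q := by rw [Int.emod_def]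
  have hsum : a % 2 ^ 18 = a + (-(2 ^ (18 - j) * q)) * 2 ^ j := by
    rw [hd]; linear_combination q * hp
  have hdiv : a % 2 ^ 18 / 2 ^ j = a / 2 ^ j + (-(2 ^ (18 - j) * q)) := by
    rw [hsum, Int.add_mul_ediv_right _ _ (by positivity)]
  have heven : (2 : Int) ∣ 2 ^ (18 - j) * q :=
    Dvd.dvd.mul_right (dvd_pow_self 2 (by omega)) q
  have e3 : (a % 2 ^ 18 / 2 ^ j) % 2 = (a / 2 ^ j) % 2 := by omega
  have e0 : hiw w t j = a % 2 ^ 18 / 2 ^ j := by unfold hiw; rw [← ha]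
  rw [e0, e1, e2, ← e3]
  omega

lemma band_mask_eq_hiw (w : Int) (t : Int) :
    PySem.Int.band (w >>> t.toNat) ((1 <<< 18) - 1) = hiw w t 0 := by
  have h : (((1 <<< 18 : Nat) : Int)) - 1 = (2 : Int) ^ 18 - 1 := by decide
  rw [h, band_two_pow_sub_one, shr_eq_div, hiw_zero]

-- the candidate list range(1, 18)
def LL : List Int := [1,2,3,4,5,6,7,8,9,10,11,12,13,14,15,16,17]

lemma pyRange_LL : PySem.List.pyRange 1 18 1 = LL := by decide

-- the descending loop range(17, -1, -1), as a recursion on its first element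
def descL : Nat → List Int
  | 0 => []
  | m + 1 => ((m : Nat) : Int) :: descL m

lemma pyRange_descL : PySem.List.pyRange 17 (-1) (-1) = descL 18 := by decide

-- one pass of B's filter loop
def stepB (w : Int) (c : List Int) (j : Int) : List Int :=
  let zeros := c.filter (fun t => PySem.Int.band (w >>> (t + j).toNat) 1 == 0)
  if zeros.isEmpty then c else zeros

-- invariant: cands is nonempty and holds exactly the shifts minimizing the bits j-and-up
def QB (w : Int) (j : Nat) (c : List Int) : Prop :=
  c ≠ [] ∧ ∀ t : Int, t ∈ c ↔ (t ∈ LL ∧ ∀ u ∈ LL, hiw w t j ≤ hiw w u j)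

lemma stepB_inv (w : Int) (j : Nat) (hj : j < 18) (c : List Int)
    (h : QB w (j + 1) c) : QB w j (stepB w c (j : Int)) := by
  obtain ⟨hne, hiff⟩ := h
  have hpred : ∀ t : Int, 0 ≤ t →
      ((PySem.Int.band (w >>> (t + (j : Int)).toNat) 1 == 0) = true ↔ bitw w (t.toNat + j) = 0) := by
    intro t ht
    have hn : (t + (j : Int)).toNat = t.toNat + j := by omega
    rw [hn, band_one_emod, shr_eq_div]
    unfold bitw
    simp
  have htpos : ∀ t ∈ LL, (0 : Int) ≤ t := by decide
  have hbit2 : ∀ n : Nat, bitw w n = 0 ∨ bitw w n = 1 := fun n => Int.emod_two_eq _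
  have hmz : ∀ t : Int,
      t ∈ c.filter (fun t => PySem.Int.band (w >>> (t + (j : Int)).toNat) 1 == 0) ↔
      t ∈ c ∧ bitw w (t.toNat + j) = 0 := by
    intro t
    rw [List.mem_filter]
    constructor
    · rintro ⟨h1, h2⟩; exact ⟨h1, (hpred t (htpos t ((hiff t).1 h1).1)).1 h2⟩
    · rintro ⟨h1, h2⟩; exact ⟨h1, (hpred t (htpos t ((hiff t).1 h1).1)).2 h2⟩
  have hdec : ∀ t : Int, hiw w t j = 2 * hiw w t (j + 1) + bitw w (t.toNat + j) :=
    fun t => hiw_step w t j hj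
  simp only [stepB]
  by_cases he : (c.filter (fun t => PySem.Int.band (w >>> (t + (j : Int)).toNat) 1 == 0)).isEmpty
  · rw [if_pos he]
    have hzn : ∀ t : Int, ¬ (t ∈ c ∧ bitw w (t.toNat + j) = 0) := by
      intro t ht
      have hmem := (hmz t).2 ht
      rw [List.isEmpty_iff] at he
      rw [he] at hmem
      exact absurd hmem (List.not_mem_nil)
    refine ⟨hne, fun t => ?_⟩
    constructor
    · intro htc
      obtain ⟨htL, hmin'⟩ := (hiff t).1 htc
      have hbt : bitw w (t.toNat + j) = 1 := by
        rcases hbit2 (t.toNat + j) with h | h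
        · exact absurd ⟨htc, h⟩ (hzn t)
        · exact h
      refine ⟨htL, fun u hu => ?_⟩
      have h2 := hmin' u hu
      rcases lt_or_eq_of_le h2 with hlt | heq
      · rw [hdec t, hdec u]
        rcases hbit2 (u.toNat + j) with h | h <;> omega
      · have huc : u ∈ c := (hiff u).2 ⟨hu, fun v hv => heq ▸ hmin' v hv⟩
        have hbu : bitw w (u.toNat + j) = 1 := by
          rcases hbit2 (u.toNat + j) with h | h
          · exact absurd ⟨huc, h⟩ (hzn u)
          · exact h
        rw [hdec t, hdec u, hbt, hbu]
        omega
    · rintro ⟨htL, hminj⟩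
      refine (hiff t).2 ⟨htL, fun u hu => ?_⟩
      have hle := hminj u hu
      rw [hdec t, hdec u] at hle
      rcases hbit2 (t.toNat + j) with h | h <;> rcases hbit2 (u.toNat + j) with h' | h' <;> omega
  · rw [if_neg he]
    have hzne : c.filter (fun t => PySem.Int.band (w >>> (t + (j : Int)).toNat) 1 == 0) ≠ [] := by
      intro hcon
      exact he (by rw [hcon]; rfl)
    obtain ⟨z, hzmem⟩ := List.exists_mem_of_ne_nil _ hzne
    obtain ⟨hzc, hbz⟩ := (hmz z).1 hzmem
    obtain ⟨hzL, hzmin'⟩ := (hiff z).1 hzc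
    refine ⟨hzne, fun t => ?_⟩
    constructor
    · intro ht
      obtain ⟨htc, hbt⟩ := (hmz t).1 ht
      obtain ⟨htL, hmin'⟩ := (hiff t).1 htc
      refine ⟨htL, fun u hu => ?_⟩
      have := hmin' u hu
      rw [hdec t, hdec u, hbt]
      rcases hbit2 (u.toNat + j) with h | h <;> omega
    · rintro ⟨htL, hminj⟩
      have htc : t ∈ c := by
        refine (hiff t).2 ⟨htL, fun u hu => ?_⟩
        have hle := hminj u hu
        rw [hdec t, hdec u] at hle
        rcases hbit2 (t.toNat + j) with h | h <;> rcases hbit2 (u.toNat + j) with h' | h' <;> omega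
      have hmin' := fun u hu => ((hiff t).1 htc).2 u hu
      have h1 : hiw w t j ≤ hiw w z j := hminj z hzL
      have h2 : hiw w z (j + 1) ≤ hiw w t (j + 1) := hzmin' t htL
      have h3 : hiw w t (j + 1) ≤ hiw w z (j + 1) := hmin' z hzL
      rw [hdec t, hdec z, hbz] at h1
      have hbt : bitw w (t.toNat + j) = 0 := by
        rcases hbit2 (t.toNat + j) with h | h
        · exact h
        · omega
      exact (hmz t).2 ⟨htc, hbt⟩

lemma fold_descL (w : Int) : ∀ m, m ≤ 18 → ∀ c, QB w m c → QB w 0 ((descL m).foldl (stepB w) c)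
  | 0, _, c, h => h
  | m + 1, hm, c, h => by
    have hs := stepB_inv w m (by omega) c h
    simpa [descL] using fold_descL w m (by omega) _ hs

lemma QB_base (w : Int) : QB w 18 LL := by
  refine ⟨by decide, fun t => ?_⟩
  simp [hiw_18]

-- A's loop, fully characterized with a shift offset
lemma foldA (w0 msk : Int) : ∀ (l : List Int) (off : Nat) (r : Int),
    l.foldl
      (fun (p : Int × Int) _t =>
        let window := p.1 >>> 1
        let s := PySem.Int.band window msk
        (window, min p.2 s)) (w0 >>> off, r)
    = (w0 >>> (off + l.length),
       ((List.range l.length).map (fun i : Nat => PySem.Int.band (w0 >>> (off + i + 1)) msk)).foldl min r) := by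
  intro l
  induction l with
  | nil => intro off r; simp
  | cons x xs ih =>
    intro off r
    simp only [List.foldl_cons]
    show xs.foldl _ ((w0 >>> off) >>> (1 : Int), min r (PySem.Int.band ((w0 >>> off) >>> (1 : Int)) msk)) = _
    rw [shr_one (w0 >>> off), shr_shr, ih (off + 1) (min r (PySem.Int.band (w0 >>> (off + 1)) msk))]
    rw [Prod.mk.injEq]
    constructor
    · have h8 : off + 1 + xs.length = off + (x :: xs).length := by
        simp only [List.length_cons]
        omega
      rw [h8]
    · rw [List.length_cons, List.range_succ_eq_map, List.map_cons, List.foldl_cons, List.map_map]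
      have hf : ((fun i : Nat => PySem.Int.band (w0 >>> (off + i + 1)) msk) ∘ Nat.succ)
          = fun i : Nat => PySem.Int.band (w0 >>> (off + 1 + i + 1)) msk := by
        funext i
        simp only [Function.comp]
        have h9 : off + (i + 1) + 1 = off + 1 + i + 1 := by omega
        rw [Nat.succ_eq_add_one, h9]
      rw [hf]

-- membership facts about LL
lemma mem_LL_of_lt (i : Nat) (hi : i < 17) : ((i + 1 : Nat) : Int) ∈ LL := by
  revert i
  decide

lemma bounds_of_mem_LL : ∀ t ∈ LL, (1 : Int) ≤ t ∧ t ≤ 17 := by decide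

-- head of a nonempty list is a member
lemma headD_mem (l : List Int) (h : l ≠ []) : l.headD 0 ∈ l := by
  cases l with
  | nil => exact absurd rfl h
  | cons a l => simp

-- the two computations agree for every window value w
lemma core_eq (state w : Int) :
    (LL.foldl
      (fun (p : Int × Int) _t =>
        let window := p.1 >>> 1
        let s := PySem.Int.band window (((1 <<< 18 : Nat) : Int) - 1)
        (window, min p.2 s)) (w, state)).2
    = min state (PySem.Int.band (w >>>
        (((descL 18).foldl
          (fun cands j =>
            let zeros := cands.filter (fun t => PySem.Int.band (w >>> (t + j).toNat) 1 == 0)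
            if zeros.isEmpty then cands else zeros) LL).headD 0).toNat)
        (((1 <<< 18 : Nat) : Int) - 1)) := by
  rw [show (fun (cands : List Int) (j : Int) =>
        let zeros := cands.filter (fun t => PySem.Int.band (w >>> (t + j).toNat) 1 == 0)
        if zeros.isEmpty then cands else zeros) = stepB w from rfl]
  obtain ⟨hne, hiff⟩ := fold_descL w 18 le_rfl LL (QB_base w)
  generalize hgen : ((descL 18).foldl (stepB w) LL) = cfin at hne hiff ⊢
  set t0 : Int := cfin.headD 0 with ht0
  obtain ⟨ht0L, ht0min⟩ := (hiff t0).1 (headD_mem _ hne)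
  have ht0b := bounds_of_mem_LL t0 ht0L
  conv_lhs => rw [show ((w, state) : Int × Int) = (w >>> (0 : Nat), state) by simp]
  rw [foldA w (((1 <<< 18 : Nat) : Int) - 1) LL 0 state]
  dsimp only
  set lA := ((List.range LL.length).map
    (fun i : Nat => PySem.Int.band (w >>> (0 + i + 1)) (((1 <<< 18 : Nat) : Int) - 1))) with hlA
  set m : Int := PySem.Int.band (w >>> t0.toNat) (((1 <<< 18 : Nat) : Int) - 1) with hm
  have hLLlen : LL.length = 17 := by decide
  have hmmem : m ∈ lA := by
    rw [hlA, hLLlen]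
    refine List.mem_map.mpr ⟨t0.toNat - 1, List.mem_range.mpr (show t0.toNat - 1 < 17 by omega), ?_⟩
    have h9 : 0 + (t0.toNat - 1) + 1 = t0.toNat := by omega
    rw [h9, ← hm]
  have hmle : ∀ y ∈ lA, m ≤ y := by
    intro y hy
    rw [hlA, hLLlen] at hy
    obtain ⟨i, hi, rfl⟩ := List.mem_map.1 hy
    rw [List.mem_range] at hi
    have hidx : 0 + i + 1 = (((i + 1 : Nat) : Int)).toNat := by simp
    rw [hm, band_mask_eq_hiw, hidx, band_mask_eq_hiw]
    exact ht0min _ (mem_LL_of_lt i hi)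
  have hle := PySem.List.foldl_min_le lA state
  rcases PySem.List.foldl_min_mem lA state with hcase | hcase
  · rw [hcase, min_eq_left]
    exact hcase ▸ hle.2 m hmmem
  · have ha1 : lA.foldl min state ≤ m := hle.2 m hmmem
    have ha2 : m ≤ lA.foldl min state := hmle _ hcase
    rw [min_eq_right (le_trans ha2 hle.1), ← le_antisymm ha1 ha2]

-- ===== VERDICT (by name: the statement is the Claim_ definition above) =====
theorem get_representative_spec : Claim_equal_get_representative := by
  intro state _
  unfold Spec_get_representative get_representative get_representative_alt
  simp only [pyRange_LL, pyRange_descL]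
  exact core_eq state (PySem.Int.bor (state <<< 18) state)
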